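-- pv_equiv track=rewrite | github.com/ChattyRS/RuneClock | cogs/mathematics.py | parentheses_depth
-- ===== SOURCE A (Python) =====
-- def parentheses_depth(input: str, index: int) -> int:
--     '''
--     Get the depth level of parentheses at the given index in the input string.
--     '''
--     depth = 0
--     for char in input[:index]:
--         if char == '(':
--             depth += 1
--         elif char == ')':
--             depth -= 1
--     return depth
-- ===== SOURCE B (Python) =====
-- def _net(s: str, lo: int, hi: int) -> int:
--     # net parenthesis balance of s[lo:hi], by divide and conquer
--     if hi - lo == 0:
--         return 0
--     if hi - lo == 1:
--         c = s[lo]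
--         return 1 if c == '(' else -1 if c == ')' else 0
--     mid = (lo + hi) // 2
--     return _net(s, lo, mid) + _net(s, mid, hi)
--
-- def parentheses_depth(input: str, index: int) -> int:
--     '''
--     Get the depth level of parentheses at the given index in the input string.
--     '''
--     n = index if index >= 0 else len(input) + index
--     n = max(0, min(n, len(input)))
--     return _net(input, 0, n)
-- ===== Notes on version B (the rewrite author's own statement) =====
-- stated objective: alternative
-- what changed: Replaces the linear left-to-right accumulator loop by a divide-and-conquer recursion that splits the prefix in half and adds the net balances of the two halves (balance is additive over concatenation), with explicit slice-bound normalisation instead of Python slicing.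
import Mathlib
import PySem

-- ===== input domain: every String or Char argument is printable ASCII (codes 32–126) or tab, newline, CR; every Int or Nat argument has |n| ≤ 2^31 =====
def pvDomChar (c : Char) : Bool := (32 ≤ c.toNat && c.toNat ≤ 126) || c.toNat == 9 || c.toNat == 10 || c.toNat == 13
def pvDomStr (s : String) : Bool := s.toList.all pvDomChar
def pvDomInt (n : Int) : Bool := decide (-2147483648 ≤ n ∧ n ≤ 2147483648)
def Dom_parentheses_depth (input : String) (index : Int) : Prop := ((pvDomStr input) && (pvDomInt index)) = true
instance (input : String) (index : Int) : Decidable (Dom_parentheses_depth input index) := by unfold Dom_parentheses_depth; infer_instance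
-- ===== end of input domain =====

-- B computes the same net balance by divide and conquer on the normalised prefix bounds
-- (balance is additive over concatenation); objective: alternative (same cost).

-- ===== PORT A =====
-- for char in input[:index]: fused accumulator with two branches
def parentheses_depth (input : String) (index : Int) : Int :=
  (PySem.Str.slice input none (some index)).toList.foldl
    (fun depth char =>
      if char == '(' then depth + 1
      else if char == ')' then depth - 1
      else depth) 0

-- ===== PORT B =====
-- _net(s, lo, hi): divide-and-conquer net balance of s[lo:hi]
def pdNet (l : List Char) (lo hi : Nat) : Int :=
  if hi - lo = 0 then 0
  else if hi - lo = 1 then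
    -- Python s[lo]; in B's calls lo is always in range, ' ' default is unreachable
    let c := l.getD lo ' '
    if c = '(' then 1 else if c = ')' then -1 else 0
  else
    pdNet l lo ((lo + hi) / 2) + pdNet l ((lo + hi) / 2) hi
termination_by hi - lo
decreasing_by all_goals omega

-- n = index if index >= 0 else len + index; n = max(0, min(n, len)); _net(input, 0, n)
def parentheses_depth_alt (input : String) (index : Int) : Int :=
  let l := input.toList
  let n0 : Int := if 0 ≤ index then index else (l.length : Int) + index
  let n : Nat := (min n0 (l.length : Int)).toNat   -- max(0, ·) is the toNat clamp
  pdNet l 0 n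

-- ===== PRECONDITION & SPEC =====
def Spec_parentheses_depth (input : String) (index : Int) (out : Int) : Prop := out = parentheses_depth_alt input index
instance (input : String) (index : Int) (out : Int) : Decidable (Spec_parentheses_depth input index out) := by unfold Spec_parentheses_depth; infer_instance

-- ===== CLAIM =====
def Claim_equal_parentheses_depth : Prop := ∀ (input : String) (index : Int), Dom_parentheses_depth input index → Spec_parentheses_depth input index (parentheses_depth input index)

-- ===== LEMMAS AND PROOFS =====

-- A's fused loop computes count '(' minus count ')'
theorem depth_loop_eq (l : List Char) (d : Int) :
    l.foldl (fun depth char =>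
      if char == '(' then depth + 1
      else if char == ')' then depth - 1
      else depth) d = d + (l.count '(' : Int) - (l.count ')' : Int) := by
  induction l generalizing d with
  | nil => simp
  | cons hd tl ih =>
    simp only [List.foldl_cons, ih, List.count_cons]
    by_cases h1 : hd = '(' <;> by_cases h2 : hd = ')' <;>
      simp [h1, h2] <;> omega

-- B's divide and conquer computes count '(' minus count ')' of the segment
theorem pdNet_eq (l : List Char) (lo hi : Nat) (hlo : lo ≤ hi) (hhi : hi ≤ l.length) :
    pdNet l lo hi =
      (((l.drop lo).take (hi - lo)).count '(' : Int) - (((l.drop lo).take (hi - lo)).count ')' : Int) := by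
  by_cases h0 : hi - lo = 0
  · rw [pdNet, if_pos h0, h0]
    simp only [List.take_zero, List.count_nil, Nat.cast_zero, sub_zero]
  · by_cases h1 : hi - lo = 1
    · have hlt : lo < l.length := by omega
      have hget : (l.drop lo).take (hi - lo) = [l[lo]] := by
        have : l.drop lo = l[lo] :: l.drop (lo + 1) := List.drop_eq_getElem_cons hlt
        rw [h1, this]; rfl
      have hgetD : l.getD lo ' ' = l[lo] := by
        simp [List.getD, hlt]
      rw [pdNet, if_neg h0, if_pos h1, hget]
      simp only [hgetD]
      by_cases c1 : l[lo] = '(' <;> by_cases c2 : l[lo] = ')' <;>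
        simp [c1, c2]
    · rw [pdNet]
      have hmid1 : lo ≤ (lo + hi) / 2 := by omega
      have hmid2 : (lo + hi) / 2 ≤ hi := by omega
      have e1 := pdNet_eq l lo ((lo + hi) / 2) hmid1 (le_trans hmid2 hhi)
      have e2 := pdNet_eq l ((lo + hi) / 2) hi hmid2 hhi
      simp only [h0, h1, if_false, e1, e2]
      have hsplit : (l.drop lo).take (hi - lo) =
          ((l.drop lo).take ((lo + hi) / 2 - lo)) ++
          ((l.drop ((lo + hi) / 2)).take (hi - (lo + hi) / 2)) := by
        have hdd : (l.drop lo).drop ((lo + hi) / 2 - lo) = l.drop ((lo + hi) / 2) := by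
          rw [List.drop_drop]
          congr 1
          omega
        have hsum : hi - lo = ((lo + hi) / 2 - lo) + (hi - (lo + hi) / 2) := by omega
        rw [hsum, List.take_add, hdd]
      rw [hsplit]
      simp [List.count_append]
      omega
termination_by hi - lo
decreasing_by all_goals omega

-- the Python slice input[:index] is a take of the same length B normalises to
theorem slice_eq_take (l : List Char) (index : Int) :
    PySem.List.slice l none (some index) =
      l.take ((min (if 0 ≤ index then index else (l.length : Int) + index) (l.length : Int)).toNat) := by
  by_cases h : 0 ≤ index
  · obtain ⟨a, rfl⟩ := Int.eq_ofNat_of_zero_le h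
    rw [PySem.List.slice_to_natCast]
    simp only [if_pos h]
    by_cases hle : (a : Int) ≤ (l.length : Int)
    · congr 1; omega
    · have hlt : ((l.length : Int)) < a := by omega
      have h1 : (min (a : Int) (l.length : Int)).toNat = l.length := by omega
      have h2 : l.length ≤ a := by exact_mod_cast hlt.le
      rw [h1, List.take_length, List.take_of_length_le h2]
  · have hk : 0 < (-index).toNat := by omega
    have hidx : index = -(((-index).toNat : Nat) : Int) := by omega
    rw [hidx, PySem.List.slice_to_neg_natCast l _ hk]
    congr 1
    simp only [← hidx, if_neg h]
    omega

-- ===== VERDICT =====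
theorem parentheses_depth_spec : Claim_equal_parentheses_depth := by
  intro input index _
  unfold Spec_parentheses_depth parentheses_depth parentheses_depth_alt
  have hb : (PySem.Str.slice input none (some index)).toList
      = PySem.List.slice input.toList none (some index) := PySem.Str.toList_slice input none (some index)
  rw [depth_loop_eq, hb, slice_eq_take]
  rw [pdNet_eq input.toList 0 _ (Nat.zero_le _) (by simp)]
  simp
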